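-- pv_equiv track=rewrite | github.com/bymars/topcoder | srm679/ListeningSongs.py | listen
-- ===== SOURCE A (Python) =====
-- def listen(durations1, durations2, minutes, T):
--     if len(durations1) < T or len(durations2) < T:
--         return -1
--     seconds = minutes * 60
--     m_durations1 = sorted(durations1)
--     m_durations2 = sorted(durations2)
--     for i in range(T):
--         seconds -= (m_durations1[i] + m_durations2[i])
--     if seconds < 0:
--         return -1
--     all_durations = m_durations1[T:] + m_durations2[T:]
--     all_durations = sorted(all_durations)
--     count = 2 * T
--     for i in range(len(all_durations)):
--         if seconds - all_durations[i] < 0: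
--             return count
--         else:
--             count += 1
--             seconds -= all_durations[i]
--     return count
-- ===== SOURCE B (Python) =====
-- def listen(durations1, durations2, minutes, T):
--     if len(durations1) < T or len(durations2) < T:
--         return -1
--     a = sorted(durations1)
--     b = sorted(durations2)
--     seconds = minutes * 60
--     for k in range(T):
--         seconds -= a[k] + b[k]
--     if seconds < 0:
--         return -1
--     ta, tb = a[T:], b[T:]
--     count = 2 * T
--     i = j = 0
--     # two-pointer merge: consume the globally smallest remaining song each step
--     while i < len(ta) and j < len(tb):
--         v = ta[i] if ta[i] <= tb[j] else tb[j]
--         if seconds < v: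
--             return count
--         seconds -= v
--         count += 1
--         if ta[i] <= tb[j]:
--             i += 1
--         else:
--             j += 1
--     rest, k = (ta, i) if j == len(tb) else (tb, j)
--     while k < len(rest):
--         if seconds < rest[k]:
--             return count
--         seconds -= rest[k]
--         count += 1
--         k += 1
--     return count
-- ===== Notes on version B (the rewrite author's own statement) =====
-- stated objective: alternative
-- what changed: The concatenate-then-resort of the two leftover tails plus the indexed greedy scan is replaced by a single two-pointer merge that consumes the smaller head of the two already-sorted tails directly, never building or sorting the combined list.
import Mathlib
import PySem

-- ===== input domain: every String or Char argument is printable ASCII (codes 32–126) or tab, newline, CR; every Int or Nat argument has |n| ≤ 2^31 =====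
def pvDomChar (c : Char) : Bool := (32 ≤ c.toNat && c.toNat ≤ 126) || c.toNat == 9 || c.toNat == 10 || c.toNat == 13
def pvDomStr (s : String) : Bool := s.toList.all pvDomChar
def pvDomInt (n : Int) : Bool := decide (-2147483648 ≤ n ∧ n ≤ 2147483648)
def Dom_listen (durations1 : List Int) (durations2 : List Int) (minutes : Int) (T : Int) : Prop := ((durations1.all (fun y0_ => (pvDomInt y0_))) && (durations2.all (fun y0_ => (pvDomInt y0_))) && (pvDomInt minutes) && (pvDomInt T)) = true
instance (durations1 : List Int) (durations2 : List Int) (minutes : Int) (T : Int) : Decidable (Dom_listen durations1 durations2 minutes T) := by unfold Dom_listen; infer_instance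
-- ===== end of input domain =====

-- B replaces A's concatenate-and-resort of the two sorted tails by a two-pointer merge
-- that consumes the smaller head directly (objective: alternative algorithm, same result).

-- ===== PORT A =====
-- A's final 'for i in range(len(all_durations))' loop with its early return,
-- transcribed as structural recursion over the list it scans in full.
def consumeA : List Int → Int → Int → Int
  | [], _, count => count
  | x :: xs, seconds, count =>
    if seconds - x < 0 then count else consumeA xs (seconds - x) (count + 1)

def listen (durations1 : List Int) (durations2 : List Int) (minutes : Int) (T : Int) : Int :=
  if (durations1.length : Int) < T ∨ (durations2.length : Int) < T then -1
  else
    let m1 := PySem.List.sorted durations1 (fun x => x) false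
    let m2 := PySem.List.sorted durations2 (fun x => x) false
    -- 'for i in range(T): seconds -= m1[i] + m2[i]'; the guard keeps every index in range,
    -- so the total pyGetD with default 0 is exact here
    let seconds := (PySem.List.pyRange 0 T 1).foldl
      (fun s i => s - (PySem.List.pyGetD m1 i 0 + PySem.List.pyGetD m2 i 0)) (minutes * 60)
    if seconds < 0 then -1
    else
      let allDur := PySem.List.sorted
        (PySem.List.slice m1 (some T) none ++ PySem.List.slice m2 (some T) none) (fun x => x) false
      consumeA allDur seconds (2 * T)

-- ===== PORT B =====
-- B's trailing 'while k < len(rest)' loop, as structural recursion over the leftover tail.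
def restConsume : List Int → Int → Int → Int
  | [], _, count => count
  | x :: xs, seconds, count =>
    if seconds < x then count else restConsume xs (seconds - x) (count + 1)

-- B's two-pointer 'while i < len(ta) and j < len(tb)' merge loop.
def mergeConsume : List Int → List Int → Int → Int → Int
  | [], tb, seconds, count => restConsume tb seconds count
  | ta, [], seconds, count => restConsume ta seconds count
  | x :: ta, y :: tb, seconds, count =>
    let v := if x ≤ y then x else y
    if seconds < v then count
    else if x ≤ y then mergeConsume ta (y :: tb) (seconds - v) (count + 1)
    else mergeConsume (x :: ta) tb (seconds - v) (count + 1)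

def listen_alt (durations1 : List Int) (durations2 : List Int) (minutes : Int) (T : Int) : Int :=
  if (durations1.length : Int) < T ∨ (durations2.length : Int) < T then -1
  else
    let a := PySem.List.sorted durations1 (fun x => x) false
    let b := PySem.List.sorted durations2 (fun x => x) false
    let seconds := (PySem.List.pyRange 0 T 1).foldl
      (fun s k => s - (PySem.List.pyGetD a k 0 + PySem.List.pyGetD b k 0)) (minutes * 60)
    if seconds < 0 then -1
    else
      mergeConsume (PySem.List.slice a (some T) none) (PySem.List.slice b (some T) none)
        seconds (2 * T)

-- ===== PRECONDITION & SPEC =====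
def Spec_listen (durations1 : List Int) (durations2 : List Int) (minutes : Int) (T : Int) (out : Int) : Prop := out = listen_alt durations1 durations2 minutes T
instance (durations1 : List Int) (durations2 : List Int) (minutes : Int) (T : Int) (out : Int) : Decidable (Spec_listen durations1 durations2 minutes T out) := by unfold Spec_listen; infer_instance

-- ===== CLAIM (what is proved, stated in full; the proofs are below) =====
def Claim_equal_listen : Prop := ∀ (durations1 : List Int) (durations2 : List Int) (minutes : Int) (T : Int), Dom_listen durations1 durations2 minutes T → Spec_listen durations1 durations2 minutes T (listen durations1 durations2 minutes T)

-- ===== LEMMAS AND PROOFS =====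

-- consumeA and restConsume test 'seconds - x < 0' vs 'seconds < x': the same predicate.
theorem restConsume_eq_consumeA (xs : List Int) (s c : Int) :
    restConsume xs s c = consumeA xs s c := by
  induction xs generalizing s c with
  | nil => rfl
  | cons x xs ih =>
    simp only [restConsume, consumeA]
    by_cases h : s - x < 0
    · rw [if_pos h, if_pos (show s < x by omega)]
    · rw [if_neg h, if_neg (show ¬ s < x by omega), ih]

-- the two-pointer loop is the greedy scan of the merged list, fused
theorem mergeConsume_eq_consumeA_merge (ta tb : List Int) (s c : Int) :
    mergeConsume ta tb s c = consumeA (ta.merge tb (fun a b => decide (a ≤ b))) s c := by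
  induction ta generalizing tb s c with
  | nil => simp [mergeConsume, restConsume_eq_consumeA]
  | cons x ta iha =>
    induction tb generalizing s c with
    | nil => simp [mergeConsume, restConsume_eq_consumeA]
    | cons y tb ihb =>
      by_cases hxy : x ≤ y
      · simp only [mergeConsume, List.merge, hxy, decide_true, if_true, consumeA]
        by_cases h : s - x < 0
        · rw [if_pos h, if_pos (show s < x by omega)]
        · rw [if_neg h, if_neg (show ¬ s < x by omega), iha]
      · simp only [mergeConsume, List.merge, hxy, decide_false, Bool.false_eq_true, if_false, consumeA]
        by_cases h : s - y < 0
        · rw [if_pos h, if_pos (show s < y by omega)]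
        · rw [if_neg h, if_neg (show ¬ s < y by omega), ihb]

-- sorted(ta ++ tb) IS the merge of the two sorted tails
theorem sorted_append_eq_merge (ta tb : List Int)
    (ha : ta.Pairwise (· ≤ ·)) (hb : tb.Pairwise (· ≤ ·)) :
    PySem.List.sorted (ta ++ tb) (fun x => x) false = ta.merge tb (fun a b => decide (a ≤ b)) := by
  exact PySem.List.sorted_id_eq_of_perm_of_pairwise _ _
    (List.merge_perm_append (fun a b => decide (a ≤ b)))
    (List.Pairwise.merge ha hb)

theorem slice_sorted_pairwise (xs : List Int) (T : Int) :
    (PySem.List.slice (PySem.List.sorted xs (fun x => x) false) (some T) none).Pairwise (· ≤ ·) := by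
  rw [PySem.List.slice_some_none]
  exact (PySem.List.sorted_pairwise xs (fun x => x)).drop

-- ===== VERDICT (by name: the statement is the Claim_ definition above) =====
theorem listen_spec : Claim_equal_listen := by
  intro d1 d2 minutes T _
  unfold Spec_listen _root_.listen listen_alt
  split
  · rfl
  · simp only
    split
    · rfl
    · rw [sorted_append_eq_merge _ _ (slice_sorted_pairwise d1 T) (slice_sorted_pairwise d2 T),
        ← mergeConsume_eq_consumeA_merge]
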